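-- pv_equiv track=rewrite | github.com/justin-thakral/dullyPDF | backend/fieldDetecting/sandbox/tools/batch_review.py | _summarize_candidates
-- ===== SOURCE A (Python) =====
-- from typing import Any, Dict, Iterable, List, Sequence
--
-- def _summarize_candidates(candidates: Sequence[Dict[str, Any]]) -> Dict[str, int]:
--     totals = {"lines": 0, "boxes": 0, "checkboxes": 0, "labels": 0}
--     for page in candidates:
--         totals["lines"] += len(page.get("lineCandidates") or [])
--         totals["boxes"] += len(page.get("boxCandidates") or [])
--         totals["checkboxes"] += len(page.get("checkboxCandidates") or [])
--         totals["labels"] += len(page.get("labels") or [])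
--     return totals
-- ===== SOURCE B (Python) =====
-- from typing import Any, Dict, Sequence
--
-- def _summarize_candidates(candidates: Sequence[Dict[str, Any]]) -> Dict[str, int]:
--     return {
--         "lines": sum(len(p.get("lineCandidates") or []) for p in candidates),
--         "boxes": sum(len(p.get("boxCandidates") or []) for p in candidates),
--         "checkboxes": sum(len(p.get("checkboxCandidates") or []) for p in candidates),
--         "labels": sum(len(p.get("labels") or []) for p in candidates),
--     }
-- ===== Notes on version B (the rewrite author's own statement) =====
-- stated objective: simpler
-- what changed: Replaces the single loop that mutates a four-key totals dict with a dict literal whose four values are independent per-field sums over the pages, so no mutable accumulator remains.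
import Mathlib
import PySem

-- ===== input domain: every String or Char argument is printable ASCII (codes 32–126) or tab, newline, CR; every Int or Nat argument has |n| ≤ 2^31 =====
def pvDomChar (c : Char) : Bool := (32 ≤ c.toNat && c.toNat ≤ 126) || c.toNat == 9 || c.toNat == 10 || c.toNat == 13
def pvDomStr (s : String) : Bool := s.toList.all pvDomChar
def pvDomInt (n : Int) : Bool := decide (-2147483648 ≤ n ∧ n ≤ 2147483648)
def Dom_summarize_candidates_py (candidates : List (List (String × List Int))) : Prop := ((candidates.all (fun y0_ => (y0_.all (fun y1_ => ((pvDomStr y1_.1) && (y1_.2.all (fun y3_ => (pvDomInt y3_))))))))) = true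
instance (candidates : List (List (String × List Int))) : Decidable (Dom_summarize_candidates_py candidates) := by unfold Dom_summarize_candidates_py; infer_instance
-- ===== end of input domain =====

-- B replaces A's single loop over a mutating four-key totals dict by a dict literal of four
-- independent per-field sums over the pages (objective: simpler; same O(n) cost).

-- ===== PORT A =====
-- page.get(k) or [] : first-match lookup in the page dict, None/missing and empty both give []
def pvPageLen (page : List (String × List Int)) (key : String) : Int :=
  ((PySem.Dict.getD ⟨page⟩ key []).length : Int)

def summarize_candidates_py (candidates : List (List (String × List Int))) : List (String × Int) :=
  (candidates.foldl
    (fun (totals : PySem.Dict String Int) page =>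
      let totals := totals.modify "lines" 0 (· + pvPageLen page "lineCandidates")
      let totals := totals.modify "boxes" 0 (· + pvPageLen page "boxCandidates")
      let totals := totals.modify "checkboxes" 0 (· + pvPageLen page "checkboxCandidates")
      let totals := totals.modify "labels" 0 (· + pvPageLen page "labels")
      totals)
    (PySem.Dict.ofList [("lines", 0), ("boxes", 0), ("checkboxes", 0), ("labels", 0)])).items

-- ===== PORT B =====
def pvFieldTotal (candidates : List (List (String × List Int))) (key : String) : Int :=
  (candidates.map (fun page => ((PySem.Dict.getD ⟨page⟩ key []).length : Int))).sum

def summarize_candidates_py_alt (candidates : List (List (String × List Int))) : List (String × Int) :=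
  [("lines", pvFieldTotal candidates "lineCandidates"),
   ("boxes", pvFieldTotal candidates "boxCandidates"),
   ("checkboxes", pvFieldTotal candidates "checkboxCandidates"),
   ("labels", pvFieldTotal candidates "labels")]

-- ===== PRECONDITION & SPEC =====
def Spec_summarize_candidates_py (candidates : List (List (String × List Int))) (out : List (String × Int)) : Prop := out = summarize_candidates_py_alt candidates
instance (candidates : List (List (String × List Int))) (out : List (String × Int)) : Decidable (Spec_summarize_candidates_py candidates out) := by unfold Spec_summarize_candidates_py; infer_instance

-- ===== CLAIM (what is proved, stated in full; the proofs are below) =====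
def Claim_equal_summarize_candidates_py : Prop := ∀ (candidates : List (List (String × List Int))), Dom_summarize_candidates_py candidates → Spec_summarize_candidates_py candidates (summarize_candidates_py candidates)

-- ===== LEMMAS AND PROOFS =====

-- ===== VERDICT (by name: the statement is the Claim_ definition above) =====
lemma pv_fold_inv (candidates : List (List (String × List Int))) :
    ∀ (a b c d : Int),
      (candidates.foldl
        (fun (totals : PySem.Dict String Int) page =>
          let totals := totals.modify "lines" 0 (· + pvPageLen page "lineCandidates")
          let totals := totals.modify "boxes" 0 (· + pvPageLen page "boxCandidates")
          let totals := totals.modify "checkboxes" 0 (· + pvPageLen page "checkboxCandidates")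
          let totals := totals.modify "labels" 0 (· + pvPageLen page "labels")
          totals)
        (PySem.Dict.mk [("lines", a), ("boxes", b), ("checkboxes", c), ("labels", d)])).items
      = [("lines", a + pvFieldTotal candidates "lineCandidates"),
         ("boxes", b + pvFieldTotal candidates "boxCandidates"),
         ("checkboxes", c + pvFieldTotal candidates "checkboxCandidates"),
         ("labels", d + pvFieldTotal candidates "labels")] := by
  induction candidates with
  | nil => intro a b c d; simp [pvFieldTotal]
  | cons p ps ih =>
      intro a b c d
      simp only [List.foldl_cons]
      have hstep : (((((PySem.Dict.mk [("lines", a), ("boxes", b), ("checkboxes", c), ("labels", d)]).modify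
            "lines" 0 (· + pvPageLen p "lineCandidates")).modify
            "boxes" 0 (· + pvPageLen p "boxCandidates")).modify
            "checkboxes" 0 (· + pvPageLen p "checkboxCandidates")).modify
            "labels" 0 (· + pvPageLen p "labels"))
        = PySem.Dict.mk [("lines", a + pvPageLen p "lineCandidates"),
            ("boxes", b + pvPageLen p "boxCandidates"),
            ("checkboxes", c + pvPageLen p "checkboxCandidates"),
            ("labels", d + pvPageLen p "labels")] := by
        simp [PySem.Dict.modify, PySem.Dict.insert, PySem.Dict.getD, PySem.Dict.get?, PySem.Dict.contains]
      rw [hstep, ih]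
      simp [pvFieldTotal, pvPageLen, add_assoc]

-- ===== VERDICT =====
theorem summarize_candidates_py_spec : Claim_equal_summarize_candidates_py := by
  intro candidates _
  unfold Spec_summarize_candidates_py summarize_candidates_py summarize_candidates_py_alt
  rw [show (PySem.Dict.ofList [("lines", (0:Int)), ("boxes", 0), ("checkboxes", 0), ("labels", 0)])
      = PySem.Dict.mk [("lines", 0), ("boxes", 0), ("checkboxes", 0), ("labels", 0)] from by decide]
  rw [pv_fold_inv]
  simp
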